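-- pv_equiv track=rewrite | github.com/smtquery/code | smtquery/smtcon/expr.py | _intel_gatherVariables_merge
-- ===== SOURCE A (Python) =====
-- def _intel_gatherVariables_merge(expr,data):
--     d_new = dict()
--     for d in data:
--         for k in set(d_new.keys()).union(set(d.keys())):
--             if k in d_new and k in d:
--                 d_new[k].update(d[k])
--             elif k in d:
--                 d_new[k] = d[k]
--             else:
--                 pass
--     return d_new
-- ===== SOURCE B (Python) =====
-- def _intel_gatherVariables_merge(expr, data):
--     # stage 1: collect the distinct keys in order of first appearance
--     order = []
--     for d in data:
--         for k in d:
--             if k not in order: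
--                 order.append(k)
--     # stage 2: for each key, union the sets of every dict that contains it
--     result = {}
--     for k in order:
--         s = set()
--         for d in data:
--             if k in d:
--                 s |= d[k]
--         result[k] = s
--     return result
-- ===== Notes on version B (the rewrite author's own statement) =====
-- stated objective: alternative
-- what changed: B is key-major and staged: a first pass collects the distinct keys in first-appearance order, then for each key a second pass unions the sets of every dict containing it, instead of A's dict-major accumulator that walks the union of the accumulated key set with each dict's keys and updates/inserts per key.
import Mathlib
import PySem

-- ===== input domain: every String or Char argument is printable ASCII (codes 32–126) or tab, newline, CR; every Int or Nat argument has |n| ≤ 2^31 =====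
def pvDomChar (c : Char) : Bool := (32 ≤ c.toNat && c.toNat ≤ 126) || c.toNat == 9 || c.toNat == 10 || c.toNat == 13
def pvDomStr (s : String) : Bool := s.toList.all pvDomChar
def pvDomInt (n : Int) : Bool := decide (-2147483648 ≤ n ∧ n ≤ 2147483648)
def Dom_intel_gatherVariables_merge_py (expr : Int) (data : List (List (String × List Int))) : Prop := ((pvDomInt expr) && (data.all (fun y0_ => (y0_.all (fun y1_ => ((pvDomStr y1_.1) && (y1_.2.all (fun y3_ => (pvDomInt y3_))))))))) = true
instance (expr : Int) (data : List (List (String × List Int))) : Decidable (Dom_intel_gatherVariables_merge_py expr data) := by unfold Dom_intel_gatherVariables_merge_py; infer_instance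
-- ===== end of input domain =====

-- B is a key-major two-stage algorithm (collect distinct keys first, then union per key across all
-- dicts) instead of A's dict-major accumulator that walks the union of the accumulated key set with
-- each dict's keys (objective: alternative). Equivalence is about the RETURN value only: Python A
-- aliases each first-seen set into the result and later .update calls mutate it (so A mutates its
-- argument's sets), while B builds fresh sets; the returned mapping is the same.

-- ===== PORT A =====
-- one step of A's inner 'for k in set(d_new.keys()).union(set(d.keys()))' loop (dd = the current dict d)
def pvAstep (dd : PySem.Dict String (List Int)) (dNew : PySem.Dict String (List Int)) (k : String) : PySem.Dict String (List Int) :=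
  if dNew.contains k && dd.contains k then
    dNew.modify k [] (fun s => PySem.Set.update s (dd.getD k []))   -- d_new[k].update(d[k])
  else if dd.contains k then
    dNew.insert k (dd.getD k [])                                    -- d_new[k] = d[k]
  else
    dNew                                                            -- pass

-- A's body for one dict d of data
def pvAmerge (dNew : PySem.Dict String (List Int)) (d : List (String × List Int)) : PySem.Dict String (List Int) :=
  let dd : PySem.Dict String (List Int) := PySem.Dict.ofList d
  (PySem.Set.union (PySem.Set.ofList dNew.keys) (PySem.Set.ofList dd.keys)).foldl (pvAstep dd) dNew

def intel_gatherVariables_merge_py (expr : Int) (data : List (List (String × List Int))) : List (String × List Int) :=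
  (data.foldl pvAmerge PySem.Dict.empty).items

-- ===== PORT B =====
-- stage 1, one step of 'for k in d: if k not in order: order.append(k)'
def pvKstep (ks : List String) (kv : String × List Int) : List String :=
  if ks.contains kv.1 then ks else ks ++ [kv.1]

-- stage 2, one step of 'for d in data: if k in d: s |= d[k]'
def pvGstep (k : String) (s : List Int) (d : List (String × List Int)) : List Int :=
  match d.find? (fun q => q.1 == k) with
  | some q => PySem.Set.update s q.2
  | none => s

def intel_gatherVariables_merge_py_alt (expr : Int) (data : List (List (String × List Int))) : List (String × List Int) :=
  let order := data.foldl (fun ks d => d.foldl pvKstep ks) []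
  (order.foldl (fun res k => res.insert k (data.foldl (pvGstep k) [])) PySem.Dict.empty).items

-- ===== PRECONDITION & SPEC =====
-- Pre_ only demands that each inner association list is a valid encoding of a Python dict of sets
-- (no duplicate keys inside one dict, no duplicate elements inside one set); lists with such
-- duplicates do not encode any Python input of type list[dict[str, set[int]]].
def Pre_intel_gatherVariables_merge_py (expr : Int) (data : List (List (String × List Int))) : Prop :=
  ∀ d ∈ data, (d.map Prod.fst).Nodup ∧ ∀ p ∈ d, p.2.Nodup
instance (expr : Int) (data : List (List (String × List Int))) : Decidable (Pre_intel_gatherVariables_merge_py expr data) := by unfold Pre_intel_gatherVariables_merge_py; infer_instance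

def pvWitness_intel_gatherVariables_merge_py : Int × (List (List (String × List Int))) :=
  (0, [[("a", [1, 2])], [("a", [2, 3]), ("b", [])]])

def Spec_intel_gatherVariables_merge_py (expr : Int) (data : List (List (String × List Int))) (out : List (String × List Int)) : Prop := out = intel_gatherVariables_merge_py_alt expr data
instance (expr : Int) (data : List (List (String × List Int))) (out : List (String × List Int)) : Decidable (Spec_intel_gatherVariables_merge_py expr data out) := by unfold Spec_intel_gatherVariables_merge_py; infer_instance

-- ===== CLAIM (what is proved, stated in full; the proofs are below) =====
def Claim_equal_intel_gatherVariables_merge_py : Prop := ∀ (expr : Int) (data : List (List (String × List Int))), Dom_intel_gatherVariables_merge_py expr data → Pre_intel_gatherVariables_merge_py expr data → Spec_intel_gatherVariables_merge_py expr data (intel_gatherVariables_merge_py expr data)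

-- ===== LEMMAS AND PROOFS =====

-- the single-pass merge both programs are proved equal to (proof-only intermediate)
def pvBstep (dNew : PySem.Dict String (List Int)) (kv : String × List Int) : PySem.Dict String (List Int) :=
  if dNew.contains kv.1 then
    dNew.modify kv.1 [] (fun s => PySem.Set.update s kv.2)
  else
    dNew.insert kv.1 (PySem.Set.ofList kv.2)

-- the per-pair effect both loops have on an already-present key of d_new
def pvUpd (d : List (String × List Int)) (p : String × List Int) : String × List Int :=
  match d.find? (fun q => q.1 == p.1) with
  | some q => (p.1, PySem.Set.update p.2 q.2)
  | none => p

theorem pvUpd_fst (d : List (String × List Int)) (p : String × List Int) : (pvUpd d p).1 = p.1 := by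
  unfold pvUpd; cases d.find? (fun q => q.1 == p.1) <;> rfl

-- basic unfoldings of the Dict API used below
theorem dict_contains_eq (dn : PySem.Dict String (List Int)) (k : String) :
    dn.contains k = dn.items.any (fun p => p.1 == k) := rfl

theorem dict_getD_eq (dn : PySem.Dict String (List Int)) (k : String) :
    dn.getD k [] = ((dn.items.find? (fun p => p.1 == k)).map Prod.snd).getD [] := rfl

theorem dict_contains_keys (dn : PySem.Dict String (List Int)) (k : String) :
    dn.contains k = dn.keys.contains k := by
  rw [Bool.eq_iff_iff, PySem.Dict.contains_iff_mem_keys, List.contains_iff_mem]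

-- in a list with pairwise-distinct keys, find? by a member's key returns exactly that member
theorem find?_key_nodup {α : Type} (l : List (String × α)) (h : (l.map Prod.fst).Nodup)
    (p : String × α) (hp : p ∈ l) : l.find? (fun q => q.1 == p.1) = some p := by
  induction l with
  | nil => cases hp
  | cons q t ih =>
    rcases List.mem_cons.mp hp with rfl | hpt
    · exact List.find?_cons_of_pos (by simp)
    · have hq1 : q.1 ≠ p.1 := by
        intro he
        exact (List.nodup_cons.mp h).1 (he ▸ List.mem_map_of_mem hpt)
      rw [List.find?_cons_of_neg (by simpa using hq1)]
      exact ih (List.nodup_cons.mp h).2 hpt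

theorem dict_insert_items_new (dn : PySem.Dict String (List Int)) (k : String) (v : List Int)
    (hc : dn.contains k = false) : (dn.insert k v).items = dn.items ++ [(k, v)] := by
  simp [PySem.Dict.insert, hc]

theorem dict_contains_insert_new (dn : PySem.Dict String (List Int)) (k : String) (v : List Int)
    (hc : dn.contains k = false) (k' : String) :
    (dn.insert k v).contains k' = (dn.contains k' || (k == k')) := by
  rw [dict_contains_eq, dict_insert_items_new dn k v hc, List.any_append]
  simp [dict_contains_eq]

theorem dict_update_items_disjoint :
    ∀ (ps : List (String × List Int)) (acc : PySem.Dict String (List Int)),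
      (ps.map Prod.fst).Nodup → (∀ p ∈ ps, acc.contains p.1 = false) →
      (acc.update ps).items = acc.items ++ ps := by
  intro ps
  induction ps with
  | nil => intro acc _ _; simp [PySem.Dict.update]
  | cons p t ih =>
    intro acc hnd hall
    have hc : acc.contains p.1 = false := hall p (by simp)
    have h1 : PySem.Dict.update acc (p :: t) = PySem.Dict.update (acc.insert p.1 p.2) t := rfl
    rw [h1, ih (acc.insert p.1 p.2) (List.nodup_cons.mp hnd).2 ?_,
        dict_insert_items_new acc p.1 p.2 hc]
    · simp
    · intro q hq
      rw [dict_contains_insert_new acc p.1 p.2 hc q.1, hall q (by simp [hq]), Bool.false_or]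
      have : p.1 ≠ q.1 := by
        intro he
        exact (List.nodup_cons.mp hnd).1 (he ▸ List.mem_map_of_mem hq)
      simpa using this

theorem dict_ofList_items (d : List (String × List Int)) (hk : (d.map Prod.fst).Nodup) :
    (PySem.Dict.ofList d).items = d := by
  have h := dict_update_items_disjoint d PySem.Dict.empty hk (fun p _ => rfl)
  simpa [PySem.Dict.ofList, PySem.Dict.empty] using h

theorem dict_modify_items (dn : PySem.Dict String (List Int)) (k : String) (f : List Int → List Int)
    (hKN : (dn.items.map Prod.fst).Nodup) (hc : dn.contains k = true) :
    (dn.modify k [] f).items = dn.items.map (fun p => if p.1 = k then (p.1, f p.2) else p) := by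
  have h1 : (dn.modify k [] f).items
      = dn.items.map (fun p => if (p.1 == k) = true then (k, f (dn.getD k [])) else p) := by
    simp [PySem.Dict.modify, PySem.Dict.insert, hc]
  rw [h1]
  apply List.map_congr_left
  intro p hp
  by_cases hpk : p.1 = k
  · have hfind : dn.items.find? (fun q => q.1 == k) = some p := by
      have := find?_key_nodup dn.items hKN p hp
      rwa [hpk] at this
    rw [dict_getD_eq, hfind]
    simp [hpk]
  · simp [hpk]

theorem dict_contains_congr (dn' dn : PySem.Dict String (List Int))
    (h : dn'.items.map Prod.fst = dn.items.map Prod.fst) (k : String) :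
    dn'.contains k = dn.contains k := by
  rw [dict_contains_eq, dict_contains_eq,
      show (fun p : String × List Int => p.1 == k) = ((· == k) ∘ Prod.fst) from rfl,
      ← List.any_map, ← List.any_map, h]

theorem dict_eq_of_items (dn dm : PySem.Dict String (List Int)) (h : dn.items = dm.items) :
    dn = dm := by
  cases dn; cases dm; simpa using h

-- one A-step on a key already present in d_new, described pair-by-pair
theorem astep_existing (d : List (String × List Int)) (dd : PySem.Dict String (List Int))
    (hdd : dd.items = d) (dn : PySem.Dict String (List Int)) (k : String)
    (hKN : (dn.items.map Prod.fst).Nodup) (hc : dn.contains k = true) :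
    (pvAstep dd dn k).items = dn.items.map (fun p => if p.1 = k then pvUpd d p else p) := by
  by_cases he : dd.contains k = true
  · have h1 : pvAstep dd dn k = dn.modify k [] (fun s => PySem.Set.update s (dd.getD k [])) := by
      simp [pvAstep, hc, he]
    rw [h1, dict_modify_items dn k _ hKN hc]
    apply List.map_congr_left
    intro p hp
    by_cases hpk : p.1 = k
    · obtain ⟨q, hq⟩ : ∃ q, d.find? (fun r => r.1 == k) = some q := by
        cases hfind : d.find? (fun r => r.1 == k) with
        | some q => exact ⟨q, rfl⟩
        | none =>
          rw [dict_contains_eq, hdd, List.any_eq_true] at he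
          obtain ⟨x, hx, hxk⟩ := he
          exact absurd hxk ((List.find?_eq_none.mp hfind) x hx)
      have hupd : pvUpd d p = (p.1, PySem.Set.update p.2 q.2) := by
        unfold pvUpd
        rw [hpk, hq]
      have hgetD : dd.getD k [] = q.2 := by
        rw [dict_getD_eq, hdd, hq]; rfl
      simp [hpk, hupd, hgetD]
    · simp [hpk]
  · have h1 : pvAstep dd dn k = dn := by
      simp [pvAstep, he]
    rw [h1]
    have : ∀ p ∈ dn.items, (if p.1 = k then pvUpd d p else p) = p := by
      intro p hp
      by_cases hpk : p.1 = k
      · -- dd does not contain k, so no pair of d has key k = p.1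
        have hfind : d.find? (fun r => r.1 == p.1) = none := by
          rw [List.find?_eq_none]
          intro x hx hxk
          rw [dict_contains_eq, hdd] at he
          exact he (List.any_eq_true.mpr ⟨x, hx, by rw [← hpk]; exact hxk⟩)
        subst hpk
        simp [pvUpd, hfind]
      · simp [hpk]
    rw [List.map_congr_left this, List.map_id']

-- A's pass over the keys already in d_new
theorem afold_existing (d : List (String × List Int)) (dd : PySem.Dict String (List Int))
    (hdd : dd.items = d) :
    ∀ (ks : List String) (dn : PySem.Dict String (List Int)), ks.Nodup →
      (∀ k ∈ ks, dn.contains k = true) → (dn.items.map Prod.fst).Nodup →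
      (ks.foldl (pvAstep dd) dn).items
        = dn.items.map (fun p => if p.1 ∈ ks then pvUpd d p else p) := by
  intro ks
  induction ks with
  | nil => intro dn _ _ _; simp
  | cons k ks ih =>
    intro dn hnd hall hKN
    have hstep := astep_existing d dd hdd dn k hKN (hall k (by simp))
    have hfst : ∀ p : String × List Int, ((fun p => if p.1 = k then pvUpd d p else p) p).1 = p.1 := by
      intro p; by_cases hpk : p.1 = k <;> simp [hpk, pvUpd_fst]
    have hkeys : (pvAstep dd dn k).items.map Prod.fst = dn.items.map Prod.fst := by
      rw [hstep, List.map_map]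
      exact List.map_congr_left (fun p _ => hfst p)
    have hcont : ∀ k', (pvAstep dd dn k).contains k' = dn.contains k' := by
      intro k'
      rw [Bool.eq_iff_iff, dict_contains_eq, dict_contains_eq, hstep, List.any_map,
          List.any_eq_true, List.any_eq_true]
      constructor
      · rintro ⟨p, hp, h⟩; exact ⟨p, hp, by simpa [Function.comp, hfst p] using h⟩
      · rintro ⟨p, hp, h⟩; exact ⟨p, hp, by simpa [Function.comp, hfst p] using h⟩
    have hres := ih (pvAstep dd dn k) (List.nodup_cons.mp hnd).2
      (fun k' hk' => by rw [hcont k']; exact hall k' (by simp [hk']))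
      (by rw [hkeys]; exact hKN)
    rw [List.foldl_cons, hres, hstep, List.map_map]
    apply List.map_congr_left
    intro p hp
    by_cases hpk : p.1 = k
    · have hknk : k ∉ ks := (List.nodup_cons.mp hnd).1
      have h2 : ¬ (pvUpd d p).1 ∈ ks := by rw [pvUpd_fst, hpk]; exact hknk
      simp only [Function.comp_apply, if_pos hpk, if_neg h2,
        if_pos (List.mem_cons.mpr (Or.inl hpk))]
    · simp only [Function.comp_apply, if_neg hpk]
      by_cases hmem : p.1 ∈ ks
      · rw [if_pos hmem, if_pos (List.mem_cons.mpr (Or.inr hmem))]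
      · rw [if_neg hmem, if_neg (by simp [hpk, hmem])]

-- A's pass over the keys new in d
theorem afold_new (d : List (String × List Int)) (dd : PySem.Dict String (List Int)) :
    ∀ (ks : List String) (dn : PySem.Dict String (List Int)), ks.Nodup →
      (∀ k ∈ ks, dn.contains k = false ∧ dd.contains k = true) →
      (ks.foldl (pvAstep dd) dn).items
        = dn.items ++ ks.map (fun k => (k, dd.getD k [])) := by
  intro ks
  induction ks with
  | nil => intro dn _ _; simp
  | cons k ks ih =>
    intro dn hnd hall
    have hc : dn.contains k = false := (hall k (by simp)).1
    have he : dd.contains k = true := (hall k (by simp)).2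
    have h1 : pvAstep dd dn k = dn.insert k (dd.getD k []) := by
      simp [pvAstep, hc, he]
    have hres := ih (dn.insert k (dd.getD k []))
      (List.nodup_cons.mp hnd).2 ?_
    · rw [List.foldl_cons, h1, hres, dict_insert_items_new dn k _ hc]
      simp
    · intro k' hk'
      refine ⟨?_, (hall k' (by simp [hk'])).2⟩
      rw [dict_contains_insert_new dn k _ hc k', (hall k' (by simp [hk'])).1, Bool.false_or]
      have : k ≠ k' := by
        intro he'; exact (List.nodup_cons.mp hnd).1 (he' ▸ hk')
      simpa using this

theorem afold_items (d : List (String × List Int)) (hk : (d.map Prod.fst).Nodup)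
    (dn : PySem.Dict String (List Int)) (hKN : (dn.items.map Prod.fst).Nodup) :
    (pvAmerge dn d).items
      = dn.items.map (pvUpd d) ++ d.filter (fun p => !(dn.contains p.1)) := by
  have hdd : (PySem.Dict.ofList d).items = d := dict_ofList_items d hk
  have h0 : pvAmerge dn d
      = (PySem.Set.union (PySem.Set.ofList dn.keys)
          (PySem.Set.ofList (PySem.Dict.ofList d).keys)).foldl (pvAstep (PySem.Dict.ofList d)) dn := rfl
  have hkeys_dd : (PySem.Dict.ofList d).keys = d.map Prod.fst := by
    rw [PySem.Dict.keys, hdd]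
  have hndk : dn.keys.Nodup := hKN
  have hK : PySem.Set.union (PySem.Set.ofList dn.keys) (PySem.Set.ofList (PySem.Dict.ofList d).keys)
      = dn.keys ++ (d.map Prod.fst).filter (fun y => !(PySem.Set.contains dn.keys y)) := by
    rw [PySem.Set.ofList_eq_self_of_nodup _ hndk, hkeys_dd,
        PySem.Set.ofList_eq_self_of_nodup _ hk]
    show PySem.Set.update dn.keys (d.map Prod.fst) = _
    rw [PySem.Set.update_eq_append_filter, PySem.Set.ofList_eq_self_of_nodup _ hk]
  rw [h0, hK, List.foldl_append]
  have hP1 := afold_existing d (PySem.Dict.ofList d) hdd dn.keys dn hndk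
    (fun k hk' => (PySem.Dict.contains_iff_mem_keys dn k).mpr hk') hKN
  set M := dn.keys.foldl (pvAstep (PySem.Dict.ofList d)) dn with hMdef
  have hM : M.items = dn.items.map (pvUpd d) := by
    rw [hP1]
    apply List.map_congr_left
    intro p hp
    have : p.1 ∈ dn.keys := List.mem_map_of_mem hp
    rw [if_pos this]
  have hMfst : M.items.map Prod.fst = dn.items.map Prod.fst := by
    rw [hM, List.map_map]
    exact List.map_congr_left (fun p _ => pvUpd_fst d p)
  set ks2 := (d.map Prod.fst).filter (fun y => !(PySem.Set.contains dn.keys y)) with hks2def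
  have hall2 : ∀ k' ∈ ks2, M.contains k' = false ∧ (PySem.Dict.ofList d).contains k' = true := by
    intro k' hk2
    rw [hks2def, List.mem_filter] at hk2
    obtain ⟨hmem, hflt⟩ := hk2
    have hnotin : k' ∉ dn.keys := by
      intro hin
      rw [(PySem.Set.contains_iff dn.keys k').mpr hin] at hflt
      exact absurd hflt (by simp)
    constructor
    · rw [dict_contains_congr M dn hMfst k']
      exact Bool.eq_false_iff.mpr
        (fun hcc => hnotin ((PySem.Dict.contains_iff_mem_keys dn k').mp hcc))
    · exact (PySem.Dict.contains_iff_mem_keys _ k').mpr (by rw [hkeys_dd]; exact hmem)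
  have hP2 := afold_new d (PySem.Dict.ofList d) ks2 M (hk.filter _) hall2
  rw [hP2, hM]
  congr 1
  have hks2 : ks2 = (d.filter (fun p => !(dn.contains p.1))).map Prod.fst := by
    rw [hks2def, List.filter_map]
    congr 1
    apply List.filter_congr
    intro p _
    simp only [Function.comp_apply]
    rw [dict_contains_keys]
    rfl
  rw [hks2, List.map_map]
  conv_rhs => rw [← List.map_id (d.filter (fun p => !(dn.contains p.1)))]
  apply List.map_congr_left
  intro p hp
  have hpd : p ∈ d := (List.mem_filter.mp hp).1
  have hfind := find?_key_nodup d hk p hpd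
  show (p.1, (PySem.Dict.ofList d).getD p.1 []) = p
  rw [dict_getD_eq, hdd, hfind]
  exact Prod.mk.eta

theorem pvUpd_notin (d : List (String × List Int)) (p : String × List Int)
    (h : p.1 ∉ d.map Prod.fst) : pvUpd d p = p := by
  unfold pvUpd
  rw [List.find?_eq_none.mpr ?_]
  intro x hx hxk
  exact h ((by simpa using hxk : x.1 = p.1) ▸ List.mem_map_of_mem hx)

theorem pvUpd_cons (k : String) (v : List Int) (d : List (String × List Int))
    (p : String × List Int) :
    pvUpd ((k, v) :: d) p
      = if p.1 = k then (p.1, PySem.Set.update p.2 v) else pvUpd d p := by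
  unfold pvUpd
  by_cases hpk : p.1 = k
  · rw [List.find?_cons_of_pos (by simpa using hpk.symm), if_pos hpk]
  · rw [List.find?_cons_of_neg (by simpa using fun h => hpk h.symm), if_neg hpk]

theorem bfold_items (d : List (String × List Int)) (hk : (d.map Prod.fst).Nodup) :
    ∀ (dn : PySem.Dict String (List Int)), (dn.items.map Prod.fst).Nodup →
      (d.foldl pvBstep dn).items
        = dn.items.map (pvUpd d)
          ++ (d.filter (fun p => !(dn.contains p.1))).map (fun p => (p.1, PySem.Set.ofList p.2)) := by
  induction d with
  | nil =>
    intro dn _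
    simp only [List.foldl_nil, List.filter_nil, List.map_nil, List.append_nil]
    rw [List.map_congr_left (fun p _ => (pvUpd_notin [] p (by simp))), List.map_id']
  | cons kv d' ih =>
    obtain ⟨k, v⟩ := kv
    have hkc : (k :: d'.map Prod.fst).Nodup := by simpa using hk
    have hknd' : k ∉ d'.map Prod.fst := (List.nodup_cons.mp hkc).1
    have hk' : (d'.map Prod.fst).Nodup := (List.nodup_cons.mp hkc).2
    intro dn hKN
    rw [List.foldl_cons]
    by_cases hc : dn.contains k = true
    · have h1 : pvBstep dn (k, v) = dn.modify k [] (fun s => PySem.Set.update s v) := by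
        simp [pvBstep, hc]
      have hitems := dict_modify_items dn k (fun s => PySem.Set.update s v) hKN hc
      have hfst : (pvBstep dn (k, v)).items.map Prod.fst = dn.items.map Prod.fst := by
        rw [h1, hitems, List.map_map]
        apply List.map_congr_left
        intro p _
        by_cases hpk : p.1 = k <;> simp [hpk]
      rw [ih hk' (pvBstep dn (k, v)) (by rw [hfst]; exact hKN)]
      congr 1
      · rw [h1, hitems, List.map_map]
        apply List.map_congr_left
        intro p _
        rw [pvUpd_cons]
        by_cases hpk : p.1 = k
        · simp only [Function.comp_apply, if_pos hpk]
          exact pvUpd_notin d' (p.1, PySem.Set.update p.2 v) (by show p.1 ∉ d'.map Prod.fst; rw [hpk]; exact hknd')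
        · simp only [Function.comp_apply, if_neg hpk]
      · rw [List.filter_cons_of_neg (by simp [hc])]
        congr 1
        exact List.filter_congr
          (fun p _ => by rw [dict_contains_congr (pvBstep dn (k, v)) dn hfst p.1])
    · have hcf : dn.contains k = false := Bool.eq_false_iff.mpr hc
      have h1 : pvBstep dn (k, v) = dn.insert k (PySem.Set.ofList v) := by
        simp [pvBstep, hcf]
      have hitems := dict_insert_items_new dn k (PySem.Set.ofList v) hcf
      have hknotin : k ∉ dn.items.map Prod.fst := by
        intro hin
        rw [(PySem.Dict.contains_iff_mem_keys dn k).mpr hin] at hcf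
        cases hcf
      have hKN' : ((pvBstep dn (k, v)).items.map Prod.fst).Nodup := by
        rw [h1, hitems, List.map_append]
        exact List.Nodup.append hKN (by simp) (by simpa [List.disjoint_left] using hknotin)
      rw [ih hk' (pvBstep dn (k, v)) hKN', h1, hitems, List.map_append]
      have hend : (([(k, PySem.Set.ofList v)] : List (String × List Int)).map (pvUpd d'))
          = [(k, PySem.Set.ofList v)] := by
        simp only [List.map_cons, List.map_nil]
        rw [pvUpd_notin d' (k, PySem.Set.ofList v) hknd']
      have hmapcong : dn.items.map (pvUpd d') = dn.items.map (pvUpd ((k, v) :: d')) := by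
        apply List.map_congr_left
        intro p hp
        rw [pvUpd_cons, if_neg ?_]
        intro hpk
        apply hknotin
        rw [← hpk]
        exact List.mem_map_of_mem hp
      have hfiltcong : d'.filter (fun p => !((dn.insert k (PySem.Set.ofList v)).contains p.1))
          = d'.filter (fun p => !(dn.contains p.1)) := by
        apply List.filter_congr
        intro p hp
        have hne : (k == p.1) = false := by
          rw [beq_eq_false_iff_ne]
          intro hb
          exact hknd' (hb ▸ List.mem_map_of_mem hp)
        rw [dict_contains_insert_new dn k _ hcf p.1, hne, Bool.or_false]
      rw [hend, hmapcong, ← h1]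
      have h1' : (pvBstep dn (k, v)) = dn.insert k (PySem.Set.ofList v) := h1
      rw [h1', hfiltcong,
          List.filter_cons_of_pos (by simp [hcf]), List.map_cons]
      simp [List.append_assoc]

theorem merge_eq (dn : PySem.Dict String (List Int)) (d : List (String × List Int))
    (hKN : (dn.items.map Prod.fst).Nodup)
    (hk : (d.map Prod.fst).Nodup) (hv : ∀ p ∈ d, p.2.Nodup) :
    pvAmerge dn d = d.foldl pvBstep dn := by
  apply dict_eq_of_items
  rw [afold_items d hk dn hKN, bfold_items d hk dn hKN]
  congr 1
  have hid : ∀ p ∈ d.filter (fun p => !(dn.contains p.1)),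
      (fun p : String × List Int => (p.1, PySem.Set.ofList p.2)) p = p := by
    intro p hp
    have hpd : p ∈ d := (List.mem_filter.mp hp).1
    show (p.1, PySem.Set.ofList p.2) = p
    rw [PySem.Set.ofList_eq_self_of_nodup _ (hv p hpd)]
  rw [List.map_congr_left hid, List.map_id']

theorem KN_bfold (dn : PySem.Dict String (List Int)) (d : List (String × List Int))
    (hk : (d.map Prod.fst).Nodup) (hKN : (dn.items.map Prod.fst).Nodup) :
    (((d.foldl pvBstep dn)).items.map Prod.fst).Nodup := by
  rw [bfold_items d hk dn hKN, List.map_append, List.map_map, List.map_map]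
  have h1 : dn.items.map (Prod.fst ∘ pvUpd d) = dn.items.map Prod.fst :=
    List.map_congr_left (fun p _ => pvUpd_fst d p)
  have h2 : (d.filter (fun p => !(dn.contains p.1))).map
        (Prod.fst ∘ fun p : String × List Int => (p.1, PySem.Set.ofList p.2))
      = (d.filter (fun p => !(dn.contains p.1))).map Prod.fst :=
    List.map_congr_left (fun p _ => rfl)
  rw [h1, h2]
  apply List.Nodup.append hKN
  · exact List.Nodup.sublist (List.Sublist.map Prod.fst List.filter_sublist) hk
  · rw [List.disjoint_left]
    intro a ha1 ha2
    obtain ⟨p, hp, hpa⟩ := List.mem_map.mp ha2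
    have hnc : dn.contains p.1 = false := by
      have := (List.mem_filter.mp hp).2
      simpa using this
    have : p.1 ∈ dn.keys := by
      show p.1 ∈ dn.items.map Prod.fst
      rw [hpa]; exact ha1
    rw [(PySem.Dict.contains_iff_mem_keys dn p.1).mpr this] at hnc
    cases hnc

-- ===== lemmas relating the single-pass merge to B's two staged passes =====

theorem pvKstep_pos (ks : List String) (kv : String × List Int)
    (hc : ks.contains kv.1 = true) : pvKstep ks kv = ks := by
  unfold pvKstep; rw [hc]; simp

theorem pvKstep_neg (ks : List String) (kv : String × List Int)
    (hc : ks.contains kv.1 = false) : pvKstep ks kv = ks ++ [kv.1] := by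
  unfold pvKstep; rw [hc]; simp

-- stage-1 inner loop over one dict with distinct keys: it appends exactly the unseen keys of d
theorem kfold_inner (d : List (String × List Int)) :
    ∀ (seen : List String), (d.map Prod.fst).Nodup →
      d.foldl pvKstep seen = seen ++ (d.map Prod.fst).filter (fun k => !seen.contains k) := by
  induction d with
  | nil => intro seen _; simp
  | cons kv t ih =>
    intro seen hnd
    have hnd' : kv.1 ∉ t.map Prod.fst ∧ (t.map Prod.fst).Nodup := by
      rw [List.map_cons, List.nodup_cons] at hnd; exact hnd
    obtain ⟨hkt, ht⟩ := hnd'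
    rw [List.foldl_cons]
    cases hc : seen.contains kv.1 with
    | true =>
      rw [pvKstep_pos seen kv hc, ih seen ht, List.map_cons,
          List.filter_cons_of_neg (by rw [hc]; decide)]
    | false =>
      rw [pvKstep_neg seen kv hc, ih (seen ++ [kv.1]) ht, List.map_cons,
          List.filter_cons_of_pos (by rw [hc]; decide), List.append_assoc,
          List.singleton_append]
      have hfc : (t.map Prod.fst).filter (fun k => !(seen ++ [kv.1]).contains k)
          = (t.map Prod.fst).filter (fun k => !seen.contains k) := by
        apply List.filter_congr
        intro x hx
        have hne : x ≠ kv.1 := fun he => hkt (he ▸ hx)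
        simp [hne]
      rw [hfc]

-- stage-1 folds only append, and never append an element of the initial accumulator
theorem kfold_inner_extend (d : List (String × List Int)) :
    ∀ (seen : List String), ∃ t, d.foldl pvKstep seen = seen ++ t ∧ ∀ x ∈ t, x ∉ seen := by
  induction d with
  | nil => intro seen; exact ⟨[], by simp⟩
  | cons kv r ih =>
    intro seen
    rw [List.foldl_cons]
    cases hc : seen.contains kv.1 with
    | true => rw [pvKstep_pos seen kv hc]; exact ih seen
    | false =>
      obtain ⟨t, ht, hnot⟩ := ih (seen ++ [kv.1])
      refine ⟨kv.1 :: t, by rw [pvKstep_neg seen kv hc, ht]; simp, ?_⟩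
      intro x hx
      rcases List.mem_cons.mp hx with rfl | hxt
      · simpa using hc
      · intro hxs; exact hnot x hxt (by simp [hxs])

theorem kfold_extend (data : List (List (String × List Int))) :
    ∀ (seen : List String), ∃ t,
      data.foldl (fun ks d => d.foldl pvKstep ks) seen = seen ++ t ∧ ∀ x ∈ t, x ∉ seen := by
  induction data with
  | nil => intro seen; exact ⟨[], by simp⟩
  | cons d rest ih =>
    intro seen
    obtain ⟨t1, ht1, hn1⟩ := kfold_inner_extend d seen
    obtain ⟨t2, ht2, hn2⟩ := ih (seen ++ t1)
    refine ⟨t1 ++ t2, ?_, ?_⟩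
    · rw [List.foldl_cons, ht1, ht2, List.append_assoc]
    · intro x hx
      rcases List.mem_append.mp hx with h | h
      · exact hn1 x h
      · intro hxs; exact hn2 x h (by simp [hxs])

theorem kfold_inner_nodup (d : List (String × List Int)) :
    ∀ (seen : List String), seen.Nodup → (d.foldl pvKstep seen).Nodup := by
  induction d with
  | nil => intro seen h; exact h
  | cons kv r ih =>
    intro seen h
    rw [List.foldl_cons]
    cases hc : seen.contains kv.1 with
    | true => rw [pvKstep_pos seen kv hc]; exact ih seen h
    | false =>
      rw [pvKstep_neg seen kv hc]
      refine ih _ (List.Nodup.append h (by simp) ?_)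
      simpa [List.disjoint_left] using (by simpa using hc : kv.1 ∉ seen)

theorem kfold_nodup (data : List (List (String × List Int))) :
    ∀ (seen : List String), seen.Nodup →
      (data.foldl (fun ks d => d.foldl pvKstep ks) seen).Nodup := by
  induction data with
  | nil => intro seen h; exact h
  | cons d rest ih =>
    intro seen h
    exact ih _ (kfold_inner_nodup d seen h)

-- one gstep on a key that d does not mention is the identity
theorem gstep_notmem (k : String) (s : List Int) (d : List (String × List Int))
    (h : k ∉ d.map Prod.fst) : pvGstep k s d = s := by
  unfold pvGstep
  rw [List.find?_eq_none.mpr ?_]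
  intro x hx hxk
  exact h ((by simpa using hxk : x.1 = k) ▸ List.mem_map_of_mem hx)

-- one gstep from the empty set on a key of d (distinct keys) yields set(d[k])
theorem gstep_empty_mem (k : String) (d : List (String × List Int))
    (hk : (d.map Prod.fst).Nodup) (p : String × List Int) (hp : p ∈ d) (hpk : p.1 = k) :
    pvGstep k [] d = PySem.Set.ofList p.2 := by
  unfold pvGstep
  have hfind : d.find? (fun q => q.1 == k) = some p := by
    have := find?_key_nodup d hk p hp
    rwa [hpk] at this
  rw [hfind]
  show PySem.Set.update [] p.2 = PySem.Set.ofList p.2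
  rw [PySem.Set.update_eq_append_filter]
  simp [PySem.Set.contains]

-- gstep agrees with pvUpd on present pairs
theorem gstep_upd (d : List (String × List Int)) (p : String × List Int) :
    (p.1, pvGstep p.1 p.2 d) = pvUpd d p := by
  unfold pvGstep pvUpd
  cases d.find? (fun q => q.1 == p.1) <;> rfl

-- the single-pass fold, characterised key-major: each surviving pair continues to gather through the
-- remaining dicts, and the keys appended after dn's are stage-1's new keys, each gathered from scratch
theorem bfold_keymajor :
    ∀ (data : List (List (String × List Int))) (dn : PySem.Dict String (List Int)),
      (∀ d ∈ data, (d.map Prod.fst).Nodup) → (dn.items.map Prod.fst).Nodup →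
      (data.foldl (fun dNew d => d.foldl pvBstep dNew) dn).items
        = dn.items.map (fun p => (p.1, data.foldl (pvGstep p.1) p.2))
          ++ ((data.foldl (fun ks d => d.foldl pvKstep ks) dn.keys).drop dn.keys.length).map
              (fun k => (k, data.foldl (pvGstep k) [])) := by
  intro data
  induction data with
  | nil =>
    intro dn _ _
    simp only [List.foldl_nil, List.drop_length, List.map_nil, List.append_nil]
    rw [List.map_congr_left (fun p _ => Prod.mk.eta), List.map_id']
  | cons d rest ih =>
    intro dn hpre hKN
    have hd : (d.map Prod.fst).Nodup := hpre d (by simp)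
    simp only [List.foldl_cons]
    set dn' := d.foldl pvBstep dn with hdn'
    have hKN' : (dn'.items.map Prod.fst).Nodup := KN_bfold dn d hd hKN
    rw [ih dn' (fun x hx => hpre x (by simp [hx])) hKN']
    have hitems' : dn'.items
        = dn.items.map (pvUpd d)
          ++ (d.filter (fun p => !(dn.contains p.1))).map (fun p => (p.1, PySem.Set.ofList p.2)) :=
      bfold_items d hd dn hKN
    -- the new keys d contributes
    set newP := d.filter (fun p => !(dn.contains p.1)) with hnewP
    have hkeys' : dn'.keys = dn.keys ++ newP.map Prod.fst := by
      show dn'.items.map Prod.fst = dn.items.map Prod.fst ++ newP.map Prod.fst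
      rw [hitems', List.map_append, List.map_map, List.map_map]
      have e1 : dn.items.map (Prod.fst ∘ pvUpd d) = dn.items.map Prod.fst :=
        List.map_congr_left (fun p _ => pvUpd_fst d p)
      have e2 : newP.map (Prod.fst ∘ fun p : String × List Int => (p.1, PySem.Set.ofList p.2))
          = newP.map Prod.fst :=
        List.map_congr_left (fun p _ => rfl)
      rw [e1, e2]
    -- stage-1's accumulator after d is dn.keys ++ newP's keys
    have hf : (d.map Prod.fst).filter (fun k => !dn.keys.contains k) = newP.map Prod.fst := by
      rw [List.filter_map, hnewP]
      congr 1
      apply List.filter_congr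
      intro p _
      simp only [Function.comp_apply]
      rw [dict_contains_keys dn p.1]
    have hstage1 : d.foldl pvKstep dn.keys = dn.keys ++ newP.map Prod.fst := by
      rw [kfold_inner d dn.keys hd, hf]
    obtain ⟨t, ht, htnot⟩ := kfold_extend rest (dn.keys ++ newP.map Prod.fst)
    have hdropA : (rest.foldl (fun ks d => d.foldl pvKstep ks) dn'.keys).drop dn'.keys.length = t := by
      rw [hkeys', ht, List.drop_left]
    have hdropB : (rest.foldl (fun ks d => d.foldl pvKstep ks) (d.foldl pvKstep dn.keys)).drop
        dn.keys.length = newP.map Prod.fst ++ t := by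
      rw [hstage1, ht, List.append_assoc, List.drop_left]
    rw [hdropA, hitems', List.map_append, List.map_map, List.map_map, hdropB, List.map_append,
        List.append_assoc]
    congr 1
    · -- surviving pairs of dn
      apply List.map_congr_left
      intro p hp
      simp only [Function.comp_apply, ← gstep_upd d p]
    congr 1
    · -- keys new in d: gathering from scratch starts with set(d[k])
      rw [List.map_map]
      apply List.map_congr_left
      intro p hp
      have hpd : p ∈ d := (List.mem_filter.mp (hnewP ▸ hp)).1
      simp only [Function.comp_apply]
      rw [gstep_empty_mem p.1 d hd p hpd rfl]
    · -- keys first appearing in rest: d contributes nothing to them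
      apply List.map_congr_left
      intro k hkt
      have hknot : k ∉ dn.keys ++ newP.map Prod.fst := htnot k hkt
      have hkd : k ∉ d.map Prod.fst := by
        intro hmem
        apply hknot
        rw [List.mem_append]
        by_cases hc : dn.contains k = true
        · exact Or.inl ((PySem.Dict.contains_iff_mem_keys dn k).mp hc)
        · right
          obtain ⟨p, hpd, hpk⟩ := List.mem_map.mp hmem
          refine List.mem_map.mpr ⟨p, ?_, hpk⟩
          rw [hnewP, List.mem_filter]
          exact ⟨hpd, by rw [hpk, Bool.eq_false_iff.mpr hc]; rfl⟩
      rw [gstep_notmem k [] d hkd]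

-- B's stage-2 loop builds exactly the key-major association list
theorem insert_fold_items (g : String → List Int) :
    ∀ (ks : List String) (dn : PySem.Dict String (List Int)), ks.Nodup →
      (∀ k ∈ ks, dn.contains k = false) →
      (ks.foldl (fun res k => res.insert k (g k)) dn).items = dn.items ++ ks.map (fun k => (k, g k)) := by
  intro ks
  induction ks with
  | nil => intro dn _ _; simp
  | cons k t ih =>
    intro dn hnd hall
    have hc : dn.contains k = false := hall k (by simp)
    rw [List.foldl_cons, ih (dn.insert k (g k)) (List.nodup_cons.mp hnd).2 ?_,
        dict_insert_items_new dn k (g k) hc]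
    · simp
    · intro k' hk'
      rw [dict_contains_insert_new dn k (g k) hc k', hall k' (by simp [hk']), Bool.false_or]
      have : k ≠ k' := fun he => (List.nodup_cons.mp hnd).1 (he ▸ hk')
      simpa using this

-- ===== VERDICT (by name: the statement is the Claim_ definition above) =====
theorem intel_gatherVariables_merge_py_spec : Claim_equal_intel_gatherVariables_merge_py := by
  intro expr data hdom hpre
  unfold Spec_intel_gatherVariables_merge_py intel_gatherVariables_merge_py intel_gatherVariables_merge_py_alt
  -- A's fold equals the single-pass merge
  have hAB : data.foldl pvAmerge PySem.Dict.empty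
      = data.foldl (fun dNew d => d.foldl pvBstep dNew) PySem.Dict.empty := by
    suffices h : ∀ (l : List (List (String × List Int))) (dn : PySem.Dict String (List Int)),
        (∀ d ∈ l, (d.map Prod.fst).Nodup ∧ ∀ p ∈ d, p.2.Nodup) → (dn.items.map Prod.fst).Nodup →
        l.foldl pvAmerge dn = l.foldl (fun dNew d => d.foldl pvBstep dNew) dn by
      exact h data PySem.Dict.empty hpre (by simp [PySem.Dict.empty])
    intro l
    induction l with
    | nil => intro dn _ _; rfl
    | cons d rest ih =>
      intro dn hpre' hKN
      have hd := hpre' d (by simp)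
      simp only [List.foldl_cons]
      rw [merge_eq dn d hKN hd.1 hd.2]
      exact ih _ (fun x hx => hpre' x (by simp [hx])) (KN_bfold dn d hd.1 hKN)
  rw [hAB]
  -- the single-pass merge, key-major, is exactly B
  have hKM := bfold_keymajor data PySem.Dict.empty
    (fun d hd => (hpre d hd).1) (by simp [PySem.Dict.empty])
  have hempty : (PySem.Dict.empty : PySem.Dict String (List Int)).items = [] := rfl
  have hkeys : (PySem.Dict.empty : PySem.Dict String (List Int)).keys = [] := rfl
  rw [hempty, hkeys] at hKM
  simp only [List.map_nil, List.nil_append, List.length_nil, List.drop_zero] at hKM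
  rw [hKM]
  rw [insert_fold_items (fun k => data.foldl (pvGstep k) [])
      (data.foldl (fun ks d => d.foldl pvKstep ks) []) PySem.Dict.empty
      (kfold_nodup data [] (by simp)) (fun k _ => rfl)]
  rw [hempty, List.nil_append]
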